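-- pv_equiv track=rewrite | github.com/tcatsuko/aoc2020 | aoc11.py | lower_left
-- ===== SOURCE A (Python) =====
-- def lower_left(layout, x, y, rows, columns, adjacent):
--     if (y == rows - 1) or (x == 0):
--         return False
--     else:
--         if layout[y+1][x-1] == '#':
--             return True
--         elif layout[y+1][x-1] == '.' and adjacent == False:
--             return lower_left(layout, x-1, y+1, rows, columns, adjacent)
--     return False
-- ===== SOURCE B (Python) =====
-- def lower_left(layout, x, y, rows, columns, adjacent):
--     # Iterative two-phase version: walk the diagonal collecting the cells seen,
--     # then decide from the last collected cell.
--     seen = []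
--     while y != rows - 1 and x != 0:
--         c = layout[y + 1][x - 1]
--         seen.append(c)
--         if c != '.' or adjacent:
--             break
--         x, y = x - 1, y + 1
--     return len(seen) > 0 and seen[-1] == '#'
-- ===== Notes on version B (the rewrite author's own statement) =====
-- stated objective: alternative
-- what changed: Replaces the branching tail recursion by an iterative walk that collects each inspected diagonal cell into a list and computes the answer once, from the last collected cell, after the loop.
-- outside the precondition, e.g. on lower_left(['##'], -1, -2, 5, 2, False): A returns True, B returns True; on lower_left(['##'], 2, -2, 5, 2, False): A returns True, B returns True
import Mathlib
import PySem

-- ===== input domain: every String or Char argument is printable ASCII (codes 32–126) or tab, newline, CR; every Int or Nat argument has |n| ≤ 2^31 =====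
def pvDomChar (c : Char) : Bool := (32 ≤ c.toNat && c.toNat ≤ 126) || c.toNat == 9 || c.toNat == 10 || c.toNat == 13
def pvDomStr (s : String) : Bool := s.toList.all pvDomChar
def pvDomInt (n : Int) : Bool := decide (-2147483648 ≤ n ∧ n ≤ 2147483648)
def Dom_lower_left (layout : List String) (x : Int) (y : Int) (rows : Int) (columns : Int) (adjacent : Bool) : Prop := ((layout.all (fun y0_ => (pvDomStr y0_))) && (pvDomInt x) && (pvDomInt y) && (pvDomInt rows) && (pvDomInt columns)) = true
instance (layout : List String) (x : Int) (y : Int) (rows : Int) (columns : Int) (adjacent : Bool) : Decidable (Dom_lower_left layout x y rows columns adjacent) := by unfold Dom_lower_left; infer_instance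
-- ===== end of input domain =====

-- B replaces A's branching tail recursion by an iterative walk that collects the visited diagonal cells into a list and then decides from the last collected cell (objective: alternative decomposition).

-- ===== PORT A =====
-- helper lemma cited by the port's decreasing_by: a successful pyGet? implies the index is below the length
theorem pvGetSomeLt {α : Type} (xs : List α) (i : Int) (v : α) (h : PySem.List.pyGet? xs i = some v) : i < (xs.length : Int) := by
  by_cases hin : PySem.Raise.InRange xs.length i
  · simpa [PySem.Raise.InRange] using hin.2
  · rw [((PySem.List.pyGet?_eq_none_iff xs i).mpr hin)] at h; cases h


def lower_left (layout : List String) (x : Int) (y : Int) (rows : Int) (columns : Int) (adjacent : Bool) : Bool :=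
  if y == rows - 1 || x == 0 then false
  else
    match h1 : PySem.List.pyGet? layout (y + 1) with
    | none => false
    | some row =>
      match PySem.Str.pyGet? row (x - 1) with
      | none => false
      | some c =>
        if c == '#' then true
        else if c == '.' && adjacent == false then
          lower_left layout (x - 1) (y + 1) rows columns adjacent
        else false
termination_by ((layout.length : Int) - y).toNat
decreasing_by
  have := pvGetSomeLt layout (y + 1) row h1
  omega


-- ===== PORT B =====
-- the while loop of Source B: walk the diagonal, collecting each inspected cell into `seen`;
-- none = the Python loop raised IndexError on the access
def llWalk (layout : List String) (x : Int) (y : Int) (rows : Int) (adjacent : Bool) (seen : List Char) : Option (List Char) :=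
  if y == rows - 1 || x == 0 then some seen
  else
    match h1 : PySem.List.pyGet? layout (y + 1) with
    | none => none
    | some row =>
      match PySem.Str.pyGet? row (x - 1) with
      | none => none
      | some c =>
        if c != '.' || adjacent then some (seen ++ [c])
        else llWalk layout (x - 1) (y + 1) rows adjacent (seen ++ [c])
termination_by ((layout.length : Int) - y).toNat
decreasing_by
  have := pvGetSomeLt layout (y + 1) row h1
  omega

def lower_left_alt (layout : List String) (x : Int) (y : Int) (rows : Int) (columns : Int) (adjacent : Bool) : Bool :=
  match llWalk layout x y rows adjacent [] with
  | none => false  -- Python raised IndexError; excluded by Pre_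
  | some seen =>
    decide (0 < seen.length) &&
      (match PySem.List.pyGet? seen (-1) with
       | some c => c == '#'
       | none => false)

-- ===== PRECONDITION & SPEC =====
-- Pre_ admits the boundary cases y = rows-1 / x = 0 (A answers False without touching the grid)
-- and the natural seat-map domain: 0 ≤ y < rows ≤ number of lines, 0 ≤ x ≤ length of every line.
-- Outside it A (and B alike) may raise IndexError, or return a value only via Python's
-- negative-index wraparound; those accidental-coordinate inputs are excluded even where A returns.
def Pre_lower_left (layout : List String) (x : Int) (y : Int) (rows : Int) (columns : Int) (adjacent : Bool) : Prop :=
  y = rows - 1 ∨ x = 0 ∨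
  (0 ≤ x ∧ 0 ≤ y ∧ y < rows ∧ rows ≤ (layout.length : Int) ∧
   ∀ s ∈ layout, x ≤ PySem.Str.len s)

instance (layout : List String) (x : Int) (y : Int) (rows : Int) (columns : Int) (adjacent : Bool) : Decidable (Pre_lower_left layout x y rows columns adjacent) := by unfold Pre_lower_left; infer_instance

def pvWitness_lower_left : List String × Int × Int × Int × Int × Bool := ([".#", ".."], 1, 0, 2, 2, false)

def Spec_lower_left (layout : List String) (x : Int) (y : Int) (rows : Int) (columns : Int) (adjacent : Bool) (out : Bool) : Prop := out = lower_left_alt layout x y rows columns adjacent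
instance (layout : List String) (x : Int) (y : Int) (rows : Int) (columns : Int) (adjacent : Bool) (out : Bool) : Decidable (Spec_lower_left layout x y rows columns adjacent out) := by unfold Spec_lower_left; infer_instance

-- ===== CLAIM (what is proved, stated in full; the proofs are below) =====
def Claim_equal_lower_left : Prop := ∀ (layout : List String) (x : Int) (y : Int) (rows : Int) (columns : Int) (adjacent : Bool), Dom_lower_left layout x y rows columns adjacent → Pre_lower_left layout x y rows columns adjacent → Spec_lower_left layout x y rows columns adjacent (lower_left layout x y rows columns adjacent)

-- ===== LEMMAS AND PROOFS =====

-- the value Source B computes from a collected cell list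
def llVal (o : Option (List Char)) : Bool :=
  match o with
  | none => false
  | some seen =>
    decide (0 < seen.length) &&
      (match PySem.List.pyGet? seen (-1) with
       | some c => c == '#'
       | none => false)

theorem llVal_last (seen : List Char) (hs : seen.getLast? = none ∨ seen.getLast? = some '.') :
    llVal (some seen) = false := by
  rcases hs with hs | hs
  · have : seen = [] := by
      cases seen with
      | nil => rfl
      | cons a l => simp [List.getLast?_eq_getLast] at hs
    subst this
    simp [llVal]
  · have hne : seen ≠ [] := by
      intro h; subst h; simp at hs
    simp [llVal, PySem.List.pyGet?_neg_one, hs]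

theorem llVal_concat (seen : List Char) (c : Char) :
    llVal (some (seen ++ [c])) = (c == '#') := by
  simp [llVal, PySem.List.pyGet?_neg_one]

theorem key (layout : List String) (rows columns : Int) (adjacent : Bool)
    (hrows : rows ≤ (layout.length : Int)) :
    ∀ (n : ℕ) (y : Int) (seen : List Char),
      (∀ s ∈ layout, (n : Int) ≤ PySem.Str.len s) → 0 ≤ y → y < rows →
      (seen.getLast? = none ∨ seen.getLast? = some '.') →
      lower_left layout (n : Int) y rows columns adjacent =
      llVal (llWalk layout (n : Int) y rows adjacent seen) := by
  intro n
  induction n with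
  | zero =>
    intro y seen _ _ _ hs
    rw [lower_left, llWalk]
    simp [llVal_last seen hs]
  | succ m ih =>
    intro y seen hx hy0 hyr hs
    rw [lower_left, llWalk]
    by_cases hbound : y = rows - 1
    · simp [hbound, llVal_last seen hs]
    · rw [if_neg (by simp; omega), if_neg (by simp; omega)]
      obtain ⟨row, hrow⟩ : ∃ row, PySem.List.pyGet? layout (y + 1) = some row := by
        cases h : PySem.List.pyGet? layout (y + 1) with
        | none =>
          exfalso
          have := (PySem.List.pyGet?_eq_none_iff layout (y + 1)).mp h
          simp [PySem.Raise.InRange] at this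
          omega
        | some r => exact ⟨r, rfl⟩
      have hmem : row ∈ layout := PySem.List.mem_of_pyGet?_eq_some layout hrow
      have him : m < row.toList.length := by
        have h := hx row hmem
        simp at h
        have e : row.toList.length = row.length := String.length_toList
        omega
      set c : Char := row.toList[m]'him with hc
      have hcol : PySem.Str.pyGet? row ((m : Int) + 1 - 1) = some c := by
        have e : ((m : Int) + 1 - 1) = ((m : Nat) : Int) := by omega
        rw [e, PySem.Str.pyGet?_natCast]
        exact List.getElem?_eq_getElem him
      rw [hrow] at *
      have hcol2 : row.toList[(m : ℕ)]? = some c := List.getElem?_eq_getElem him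
      simp only [Nat.cast_add, Nat.cast_one]
      simp [hcol2]
      by_cases hch : c = '#'
      · rw [if_pos (by simp [hch]), llVal_concat]
        simp [hch]
      · by_cases hcd : c = '.'
        · cases adjacent with
          | true =>
            rw [if_pos (by simp)]
            rw [llVal_concat]
            simp [hch, hcd]
          | false =>
            rw [if_neg (by simp [hcd])]
            simp only [hch, hcd]
            simp
            rw [← hcd]
            exact ih (y + 1) (seen ++ [c])
              (by intro s hs; have := hx s hs; omega) (by omega) (by omega)
              (by right; simp [hcd])
        · rw [if_pos (by simp [hcd]), llVal_concat]
          simp [hch, hcd]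

-- ===== VERDICT (by name: the statement is the Claim_ definition above) =====
theorem lower_left_spec : Claim_equal_lower_left := by
  intro layout x y rows columns adjacent _ hpre
  unfold Spec_lower_left
  have halt : lower_left_alt layout x y rows columns adjacent
      = llVal (llWalk layout x y rows adjacent []) := rfl
  rcases hpre with hg | hg | ⟨hx0, hy0, hyr, hrl, hlens⟩
  · subst hg
    rw [lower_left, halt, llWalk]
    simp [llVal]
  · subst hg
    rw [lower_left, halt, llWalk]
    simp [llVal]
  · have hx : ((x.toNat : ℕ) : Int) = x := Int.toNat_of_nonneg hx0
    rw [halt, ← hx]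
    exact key layout rows columns adjacent hrl x.toNat y []
      (by intro s hs; have := hlens s hs; omega) hy0 hyr (by simp)
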